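-- pv_equiv track=rewrite | github.com/omgitsfaraaz/coderbyte | areFollowingPatterns.py | areFollowingPatterns
-- ===== SOURCE A (Python) =====
-- def areFollowingPatterns(strings, patterns):
--     if len(strings) != len(patterns):
--         return False
--     d = {}
--     for i in range(len(strings)):
--         if patterns[i] not in d:
--             if strings[i] not in d.values():
--                 d[patterns[i]] = strings[i]
--             else:
--                 return False
--         else:
--             if d[patterns[i]] != strings[i]:
--                 return False
--     return True
-- ===== SOURCE B (Python) =====
-- def _encode(xs):
--     ids = {}
--     out = []
--     for x in xs:
--         if x not in ids:
--             ids[x] = len(ids)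
--         out.append(ids[x])
--     return out
--
--
-- def areFollowingPatterns(strings, patterns):
--     return _encode(strings) == _encode(patterns)
-- ===== Notes on version B (the rewrite author's own statement) =====
-- stated objective: idiomatic
-- what changed: Replaces the interleaved dict-consistency loop with early exits by independently normalizing each list to its canonical first-occurrence id encoding via a dict and comparing the two encodings once (the length check becomes implicit in encoding equality).
import Mathlib
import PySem

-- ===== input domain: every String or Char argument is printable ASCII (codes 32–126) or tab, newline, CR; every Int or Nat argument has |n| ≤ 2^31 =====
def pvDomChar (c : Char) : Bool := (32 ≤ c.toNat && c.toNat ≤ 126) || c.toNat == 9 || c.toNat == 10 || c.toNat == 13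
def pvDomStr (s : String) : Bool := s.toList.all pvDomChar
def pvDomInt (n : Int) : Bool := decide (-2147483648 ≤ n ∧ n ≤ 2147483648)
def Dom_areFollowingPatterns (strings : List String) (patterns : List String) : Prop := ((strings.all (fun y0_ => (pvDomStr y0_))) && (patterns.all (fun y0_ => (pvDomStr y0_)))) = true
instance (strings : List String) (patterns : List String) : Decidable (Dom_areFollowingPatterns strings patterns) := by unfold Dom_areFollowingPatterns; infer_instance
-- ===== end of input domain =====

-- B normalizes each list independently to its canonical first-occurrence id encoding and compares
-- the two encodings once, replacing A's interleaved dict-consistency loop (objective: idiomatic).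

-- ===== PORT A =====
-- the loop 'for i in range(len(strings))' over both lists at equal length, with d the pattern→string dict
def pvLoopA (d : PySem.Dict String String) : List (String × String) → Bool
  | [] => true
  | (s, p) :: rest =>
    match d.get? p with
    | none => if d.values.contains s then false else pvLoopA (d.insert p s) rest
    | some v => if v == s then pvLoopA d rest else false

def areFollowingPatterns (strings : List String) (patterns : List String) : Bool :=
  if strings.length ≠ patterns.length then false
  else pvLoopA PySem.Dict.empty (strings.zip patterns)

-- ===== PORT B =====
-- _encode: assign each newly seen element the next id (len(ids)) and emit the id sequence
def pvEncode : List String → PySem.Dict String Nat → List Nat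
  | [], _ => []
  | x :: rest, ids =>
    match ids.get? x with
    | some k => k :: pvEncode rest ids
    | none => ids.size :: pvEncode rest (ids.insert x ids.size)

def areFollowingPatterns_alt (strings : List String) (patterns : List String) : Bool :=
  pvEncode strings PySem.Dict.empty == pvEncode patterns PySem.Dict.empty

-- ===== PRECONDITION & SPEC =====
def Spec_areFollowingPatterns (strings : List String) (patterns : List String) (out : Bool) : Prop := out = areFollowingPatterns_alt strings patterns
instance (strings : List String) (patterns : List String) (out : Bool) : Decidable (Spec_areFollowingPatterns strings patterns out) := by unfold Spec_areFollowingPatterns; infer_instance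

-- ===== CLAIM (what is proved, stated in full; the proofs are below) =====
def Claim_equal_areFollowingPatterns : Prop := ∀ (strings : List String) (patterns : List String), Dom_areFollowingPatterns strings patterns → Spec_areFollowingPatterns strings patterns (areFollowingPatterns strings patterns)

-- ===== LEMMAS AND PROOFS =====

-- the id dict that _encode has built after a key list l (ids l.zipIdx in insertion order)
lemma pv_get?_zipIdx (l : List String) (p : String) : ∀ n : Nat,
    (PySem.Dict.mk (l.zipIdx n)).get? p = (PySem.List.index? l p).map (· + n) := by
  induction l with
  | nil => intro n; rfl
  | cons a l ih =>
    intro n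
    rw [List.zipIdx_cons, PySem.Dict.get?_mk_cons]
    by_cases h : a = p
    · subst h
      rw [PySem.List.index?_cons_self]
      simp
    · rw [PySem.List.index?_cons_of_ne _ h, if_neg (by simp [h]), ih (n + 1), Option.map_map]
      cases PySem.List.index? l p with
      | none => rfl
      | some k => simp; omega

lemma pv_get?_zipIdx_zero (l : List String) (p : String) :
    (PySem.Dict.mk (l.zipIdx 0)).get? p = PySem.List.index? l p := by
  rw [pv_get?_zipIdx]
  cases PySem.List.index? l p <;> simp

-- lookup in A's dict, expressed through the first index of the key
lemma pv_get?_mk_index (its : List (String × String)) (p : String) :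
    (PySem.Dict.mk its).get? p
      = (PySem.List.index? (its.map Prod.fst) p).bind (fun k => (its.map Prod.snd)[k]?) := by
  induction its with
  | nil => rfl
  | cons a its ih =>
    rw [List.map_cons, List.map_cons, PySem.Dict.get?_mk_cons]
    by_cases h : a.1 = p
    · rw [← h, PySem.List.index?_cons_self, if_pos (by simp)]
      rfl
    · rw [PySem.List.index?_cons_of_ne _ h, if_neg (by simp [h]), ih]
      cases PySem.List.index? (its.map Prod.fst) p with
      | none => rfl
      | some k => simp

lemma pv_index?_of_nodup_getElem (l : List String) (hnd : l.Nodup) (k : Nat) (hk : k < l.length) :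
    PySem.List.index? l l[k] = some k := by
  rw [PySem.List.index?_eq_some_iff]
  refine ⟨l.take k, l.drop (k + 1), ?_, by simp [Nat.le_of_lt hk], ?_⟩
  · rw [List.getElem_cons_drop hk, List.take_append_drop]
  · intro hmem
    obtain ⟨j, hj, hje⟩ := List.getElem_of_mem hmem
    have hjk : j < k := lt_of_lt_of_le hj (by simp)
    rw [List.getElem_take] at hje
    exact absurd ((List.Nodup.getElem_inj_iff hnd).mp hje) (by omega)

lemma pv_encode_length (xs : List String) : ∀ d, (pvEncode xs d).length = xs.length := by
  induction xs with
  | nil => intro d; rfl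
  | cons x xs ih =>
    intro d
    rw [pvEncode]
    cases d.get? x <;> simp [ih]

lemma pv_beq_cons_self (a : Nat) (X Y : List Nat) : ((a :: X : List Nat) == a :: Y) = (X == Y) := by
  simp [BEq.beq, List.beq]

lemma pv_beq_cons_ne (a b : Nat) (h : a ≠ b) (X Y : List Nat) :
    ((a :: X : List Nat) == b :: Y) = false := by
  rw [beq_eq_false_iff_ne]
  intro he
  exact h (by injection he)

lemma pv_beq_len_ne (X Y : List Nat) (h : X.length ≠ Y.length) : (X == Y) = false := by
  rw [beq_eq_false_iff_ne]; intro he; exact h (by rw [he])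

-- fresh insert into an id dict appends the next id
lemma pv_insert_zipIdx (l : List String) (p : String) (hp : p ∉ l) (n : Nat) (hn : n = l.length) :
    (PySem.Dict.mk (l.zipIdx 0)).insert p n = PySem.Dict.mk ((l ++ [p]).zipIdx 0) := by
  subst hn
  apply PySem.Dict.ext
  rw [PySem.Dict.items_insert_of_not_contains, List.zipIdx_append]
  · simp
  · rw [PySem.Dict.contains_eq_isSome_get?, pv_get?_zipIdx_zero,
      (PySem.List.index?_eq_none_iff _ _).mpr hp, Option.isSome_none]

-- fresh insert into A's dict appends the pair
lemma pv_insert_mk (its : List (String × String)) (p s : String)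
    (hp : (PySem.Dict.mk its).get? p = none) :
    (PySem.Dict.mk its).insert p s = PySem.Dict.mk (its ++ [(p, s)]) := by
  apply PySem.Dict.ext
  rw [PySem.Dict.items_insert_of_not_contains]
  rw [PySem.Dict.contains_eq_isSome_get?, hp, Option.isSome_none]

-- the central invariant: A's loop from dict state (mk its) computes exactly the comparison of
-- the two encodings continued from the id dicts of its values (strings seen) and keys (patterns seen)
lemma pv_main (l : List (String × String)) : ∀ its : List (String × String),
    (its.map Prod.fst).Nodup → (its.map Prod.snd).Nodup →
    pvLoopA (PySem.Dict.mk its) l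
      = (pvEncode (l.map Prod.fst) (PySem.Dict.mk ((its.map Prod.snd).zipIdx 0))
          == pvEncode (l.map Prod.snd) (PySem.Dict.mk ((its.map Prod.fst).zipIdx 0))) := by
  induction l with
  | nil =>
    intro its _ _
    simp [pvLoopA, pvEncode]
  | cons sp rest ih =>
    intro its hk hv
    obtain ⟨s, p⟩ := sp
    have hlen : (its.map Prod.snd).length = (its.map Prod.fst).length := by simp
    have hsize : (PySem.Dict.mk ((its.map Prod.fst).zipIdx 0)).size
        = (its.map Prod.fst).length := by simp [PySem.Dict.size]
    have hszs : (PySem.Dict.mk ((its.map Prod.snd).zipIdx 0)).size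
        = (its.map Prod.snd).length := by simp [PySem.Dict.size]
    rw [List.map_cons, List.map_cons, pvLoopA, pvEncode, pvEncode,
      pv_get?_zipIdx_zero, pv_get?_zipIdx_zero, pv_get?_mk_index]
    cases hpi : PySem.List.index? (its.map Prod.fst) p with
    | none =>
      -- pattern p is new: A checks whether s reuses a value
      simp only [Option.bind_none]
      cases hsi : PySem.List.index? (its.map Prod.snd) s with
      | some k' =>
        -- s already used: A returns False; the encodings differ at this position
        have hmem : s ∈ its.map Prod.snd := (PySem.List.index?_isSome_iff _ _).mp (by rw [hsi]; rfl)
        have hcont : (PySem.Dict.mk its).values.contains s = true := by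
          simp only [PySem.Dict.values]
          simp [List.contains_eq_mem, hmem]
        rw [hcont, if_pos rfl]
        dsimp only
        obtain ⟨hk', _, _⟩ := PySem.List.getElem_of_index?_eq_some hsi
        rw [hsize]
        exact (pv_beq_cons_ne _ _ (by omega) _ _).symm
      | none =>
        -- both sides are fresh: both emit the same next id and extend their dicts in step
        have hns : s ∉ its.map Prod.snd := (PySem.List.index?_eq_none_iff _ _).mp hsi
        have hnp : p ∉ its.map Prod.fst := (PySem.List.index?_eq_none_iff _ _).mp hpi
        have hcont : (PySem.Dict.mk its).values.contains s = false := by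
          simp only [PySem.Dict.values]
          simp [List.contains_eq_mem, hns]
        rw [hcont, if_neg (by simp)]
        dsimp only
        have hgp : (PySem.Dict.mk its).get? p = none := by
          rw [pv_get?_mk_index, hpi]; rfl
        rw [pv_insert_mk its p s hgp, hszs, hsize, hlen,
          pv_insert_zipIdx _ s hns _ hlen.symm, pv_insert_zipIdx _ p hnp _ rfl,
          pv_beq_cons_self]
        have hih := ih (its ++ [(p, s)])
          (by simpa using hk.concat hnp) (by simpa using hv.concat hns)
        simp only [List.map_append, List.map_cons, List.map_nil] at hih
        exact hih
    | some k =>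
      -- pattern p was seen at first index k with value vals[k]
      obtain ⟨hklt, hkv, _⟩ := PySem.List.getElem_of_index?_eq_some hpi
      have hklt' : k < (its.map Prod.snd).length := by rw [hlen]; exact hklt
      simp only [Option.bind_some, List.getElem?_eq_getElem hklt']
      by_cases hvs : (its.map Prod.snd)[k] = s
      · -- consistent: both encodings emit the first-occurrence index k
        rw [hvs, if_pos (by rw [beq_iff_eq])]
        have hsk : PySem.List.index? (its.map Prod.snd) s = some k := by
          rw [← hvs]; exact pv_index?_of_nodup_getElem _ hv k hklt'
        rw [hsk]
        dsimp only
        rw [ih its hk hv, pv_beq_cons_self]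
      · -- inconsistent: A returns False; the string-side id differs from k
        rw [if_neg (by rw [beq_iff_eq]; exact hvs)]
        cases hsi : PySem.List.index? (its.map Prod.snd) s with
        | some k' =>
          obtain ⟨_, hk'v, _⟩ := PySem.List.getElem_of_index?_eq_some hsi
          dsimp only
          refine (pv_beq_cons_ne _ _ (fun he => hvs ?_) _ _).symm
          subst he
          exact hk'v
        | none =>
          dsimp only
          rw [hszs, hlen]
          exact (pv_beq_cons_ne _ _ (by omega) _ _).symm

-- ===== VERDICT (by name: the statement is the Claim_ definition above) =====
theorem areFollowingPatterns_spec : Claim_equal_areFollowingPatterns := by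
  intro strings patterns _
  show areFollowingPatterns strings patterns = areFollowingPatterns_alt strings patterns
  unfold areFollowingPatterns areFollowingPatterns_alt
  by_cases hlen : strings.length = patterns.length
  · rw [if_neg (by omega)]
    have hmain := pv_main (strings.zip patterns) [] (by simp) (by simp)
    rw [List.map_fst_zip (le_of_eq hlen), List.map_snd_zip (le_of_eq hlen.symm)] at hmain
    simpa using hmain
  · rw [if_pos hlen, eq_comm, pv_beq_len_ne]
    rw [pv_encode_length, pv_encode_length]
    exact hlen
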